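-- pv_equiv track=rewrite | github.com/drewbrew/advent-of-code-2019 | day16.py | apply_pattern
-- ===== SOURCE A (Python) =====
-- BASE_PATTERN = [0, 1, 0, -1]
--
-- def generate_output_pattern(input_, position):
--     output = []
--     while len(output) < len(input_) + 1:
--         for i in BASE_PATTERN:
--             output += [i for _ in range(1, position + 1)]
--     del output[0]
--     return output[:len(input_)]
--
-- def apply_pattern(input_):
--     output = []
--     for i in range(len(input_)):
--         pattern = generate_output_pattern(input_, i + 1)
--         output.append(
--             abs(sum(x * y for x, y in zip(input_, pattern))) % 10
--         )
--     assert len(output) == len(input_)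
--     return output
-- ===== SOURCE B (Python) =====
-- def apply_pattern(input_):
--     # prefix sums: the pattern for position k is +1 on blocks [k-1+4k*b, 2k-1+4k*b)
--     # and -1 on blocks [3k-1+4k*b, 4k-1+4k*b); each block is summed in O(1).
--     n = len(input_)
--     prefix = [0]
--     acc = 0
--     for v in input_:
--         acc += v
--         prefix.append(acc)
--     output = []
--     for k in range(1, n + 1):
--         s = 0
--         start = k - 1
--         while start < n:
--             s += prefix[min(start + k, n)] - prefix[start]
--             start += 4 * k
--         start = 3 * k - 1
--         while start < n:
--             s -= prefix[min(start + k, n)] - prefix[start]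
--             start += 4 * k
--         output.append(abs(s) % 10)
--     return output
-- ===== Notes on version B (the rewrite author's own statement) =====
-- stated objective: faster
-- what changed: B replaces A's per-row pattern-list generation and full dot product by one precomputed prefix-sum array, summing each contiguous +1/-1 pattern block in O(1), so row k costs O(n/k) instead of O(n).
import Mathlib
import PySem

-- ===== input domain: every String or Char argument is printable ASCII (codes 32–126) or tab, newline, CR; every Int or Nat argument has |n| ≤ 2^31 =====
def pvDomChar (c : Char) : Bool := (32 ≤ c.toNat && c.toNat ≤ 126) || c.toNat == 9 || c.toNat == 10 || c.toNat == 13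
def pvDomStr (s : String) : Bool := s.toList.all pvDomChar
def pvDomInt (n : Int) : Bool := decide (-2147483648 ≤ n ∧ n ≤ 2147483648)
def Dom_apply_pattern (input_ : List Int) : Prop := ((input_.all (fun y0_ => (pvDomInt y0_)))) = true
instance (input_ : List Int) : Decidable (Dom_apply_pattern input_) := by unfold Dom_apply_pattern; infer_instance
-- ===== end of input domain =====

-- B replaces A's per-row pattern-list generation and dot product by a pref-sum array,
-- summing each contiguous +1/-1 pattern block in O(1) (timed asymptotically faster).


-- ===== PORT A =====
def BASE_PATTERN : List Int := [0, 1, 0, -1]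

-- one while-iteration body: 'for i in BASE_PATTERN: output += [i for _ in range(1, position + 1)]'
def pvBlock (position : Nat) : List Int :=
  BASE_PATTERN.foldl (fun acc i => acc ++ List.replicate position i) []

-- the 'while len(output) < len(input_) + 1' loop; pos1 = position - 1
-- (apply_pattern always calls with position = i + 1 ≥ 1, which the loop needs to terminate)
def pvGenLoop (target pos1 : Nat) (output : List Int) : List Int :=
  if output.length < target then pvGenLoop target pos1 (output ++ pvBlock (pos1 + 1)) else output
termination_by target - output.length
decreasing_by simp [pvBlock, BASE_PATTERN]; omega

def generate_output_pattern (input_ : List Int) (pos1 : Nat) : List Int :=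
  ((pvGenLoop (input_.length + 1) pos1 []).drop 1).take input_.length  -- del output[0]; output[:len(input_)]

def apply_pattern (input_ : List Int) : List Int :=
  -- 'for i in range(len(input_))', appending abs(sum(x*y for x,y in zip(input_, pattern))) % 10
  -- (the summand is ≥ 0, so Lean's % equals Python's % here)
  (List.range input_.length).foldl (fun output i =>
    let pattern := generate_output_pattern input_ i
    output ++ [(((input_.zip pattern).foldl (fun s (xy : Int × Int) => s + xy.1 * xy.2) 0).natAbs : Int) % 10]) []

-- ===== PORT B =====
-- 'pref = [0]; acc = 0; for v in input_: acc += v; pref.append(acc)'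
def pvPrefix (input_ : List Int) : List Int :=
  (input_.foldl (fun st v => (st.1 ++ [st.2 + v], st.2 + v)) (([0] : List Int), (0 : Int))).1

-- 'while start < n: s += pref[min(start + k, n)] - pref[start]; start += 4*k'; k = k1 + 1
-- (pref has length n + 1 and both indices are in range, so getD is exact here)
def pvPlusLoop (pref : List Int) (n k1 start : Nat) (s : Int) : Int :=
  if start < n then
    pvPlusLoop pref n k1 (start + 4 * (k1 + 1))
      (s + (pref.getD (min (start + (k1 + 1)) n) 0 - pref.getD start 0))
  else s
termination_by n - start

-- the second while loop, subtracting each block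
def pvMinusLoop (pref : List Int) (n k1 start : Nat) (s : Int) : Int :=
  if start < n then
    pvMinusLoop pref n k1 (start + 4 * (k1 + 1))
      (s - (pref.getD (min (start + (k1 + 1)) n) 0 - pref.getD start 0))
  else s
termination_by n - start

def apply_pattern_alt (input_ : List Int) : List Int :=
  -- 'for k in range(1, n + 1)' with k = k1 + 1; plus blocks start at k-1, minus blocks at 3k-1
  let n := input_.length
  let pref := pvPrefix input_
  (List.range n).foldl (fun output k1 =>
    let s := pvPlusLoop pref n k1 k1 0
    let s := pvMinusLoop pref n k1 (3 * k1 + 2) s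
    output ++ [((s.natAbs : Int) % 10)]) []

-- ===== PRECONDITION & SPEC =====
def Spec_apply_pattern (input_ : List Int) (out : List Int) : Prop := out = apply_pattern_alt input_
instance (input_ : List Int) (out : List Int) : Decidable (Spec_apply_pattern input_ out) := by unfold Spec_apply_pattern; infer_instance

-- ===== CLAIM (what is proved, stated in full; the proofs are below) =====
def Claim_equal_apply_pattern : Prop := ∀ (input_ : List Int), Dom_apply_pattern input_ → Spec_apply_pattern input_ (apply_pattern input_)

-- ===== LEMMAS AND PROOFS =====

-- the base-pattern value read at a (already reduced) index
def pvBase (t : Nat) : Int := BASE_PATTERN.getD t 0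

-- the coefficient of input element j in output row k1 (Python position k1 + 1)
def pvCoef (k1 j : Nat) : Int := pvBase ((j + 1) / (k1 + 1) % 4)

-- the +1-block / -1-block summands of row k1
def pvIte1 (xs : List Int) (k1 j : Nat) : Int :=
  if (j + 1) / (k1 + 1) % 4 = 1 then xs.getD j 0 else 0
def pvIte3 (xs : List Int) (k1 j : Nat) : Int :=
  if (j + 1) / (k1 + 1) % 4 = 3 then xs.getD j 0 else 0

lemma sum_map_range (n : Nat) (f : Nat → Int) :
    ((List.range n).map f).sum = ∑ j ∈ Finset.range n, f j := by
  induction n with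
  | zero => simp
  | succ m ih => rw [List.range_succ, Finset.sum_range_succ, List.map_append, List.sum_append, ih]; simp

lemma pvBlock_eq (p : Nat) : pvBlock p =
    List.replicate p 0 ++ List.replicate p 1 ++ List.replicate p 0 ++ List.replicate p (-1) := by
  simp [pvBlock, BASE_PATTERN]

lemma pvBlock_length (p : Nat) : (pvBlock p).length = 4 * p := by
  simp [pvBlock_eq]; omega

lemma pvBlock_getElem (p u : Nat) (h : u < 4 * p) :
    (pvBlock p)[u]'(by rw [pvBlock_length]; exact h) = pvBase (u / p) := by
  have hp : 0 < p := by omega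
  have hlt : u / p < 4 := by
    rw [Nat.div_lt_iff_lt_mul hp]; omega
  rcases Nat.lt_or_ge u p with h1 | h1
  · have hd : u / p = 0 := Nat.div_eq_of_lt h1
    simp [pvBlock_eq, h1, hd, pvBase, BASE_PATTERN]
  · rcases Nat.lt_or_ge u (2 * p) with h2 | h2
    · have hd : u / p = 1 := Nat.div_eq_of_lt_le (by omega) (by omega)
      simp [pvBlock_eq, List.getElem_append, h1, hd, pvBase, BASE_PATTERN]
      omega
    · rcases Nat.lt_or_ge u (3 * p) with h3 | h3
      · have hd : u / p = 2 := Nat.div_eq_of_lt_le (by omega) (by omega)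
        simp [pvBlock_eq, List.getElem_append, h1, hd, pvBase, BASE_PATTERN]
        omega
      · have hd : u / p = 3 := Nat.div_eq_of_lt_le (by omega) (by omega)
        simp [pvBlock_eq, List.getElem_append, h1, hd, pvBase, BASE_PATTERN]
        omega

lemma pvGenLoop_spec (target pos1 : Nat) (out : List Int)
    (hmod : out.length % (4 * (pos1 + 1)) = 0)
    (helem : ∀ t (ht : t < out.length), out[t] = pvBase (t / (pos1 + 1) % 4)) :
    target ≤ (pvGenLoop target pos1 out).length ∧
    (pvGenLoop target pos1 out).length % (4 * (pos1 + 1)) = 0 ∧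
    ∀ t (ht : t < (pvGenLoop target pos1 out).length),
      (pvGenLoop target pos1 out)[t] = pvBase (t / (pos1 + 1) % 4) := by
  revert hmod helem
  induction out using pvGenLoop.induct target pos1 with
  | case1 out hlt ih =>
    intro hmod helem
    rw [pvGenLoop, if_pos hlt]
    rw [show pvGenLoop target pos1 (out ++ pvBlock (pos1 + 1)) = pvGenLoop target pos1 (out ++ pvBlock (pos1 + 1)) from rfl]
    apply ih
    · simp [pvBlock_length]; omega
    · intro t ht
      simp [pvBlock_length] at ht
      rcases Nat.lt_or_ge t out.length with h1 | h1
      · rw [List.getElem_append_left h1]; exact helem t h1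
      · rw [List.getElem_append_right h1]
        have hu : t - out.length < 4 * (pos1 + 1) := by omega
        rw [pvBlock_getElem (pos1 + 1) (t - out.length) hu]
        obtain ⟨q, hq⟩ : ∃ q, out.length = (pos1 + 1) * (4 * q) := by
          obtain ⟨q, hq⟩ := Nat.dvd_of_mod_eq_zero hmod
          exact ⟨q, by rw [hq]; ring⟩
        have hdiv : t / (pos1 + 1) = 4 * q + (t - out.length) / (pos1 + 1) := by
          conv_lhs => rw [show t = (pos1 + 1) * (4 * q) + (t - out.length) by omega]
          rw [Nat.mul_add_div (by omega)]
        have hlt4 : (t - out.length) / (pos1 + 1) < 4 := by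
          rw [Nat.div_lt_iff_lt_mul (by omega)]; omega
        congr 1
        rw [hdiv]
        generalize (t - out.length) / (pos1 + 1) = X at hlt4 ⊢
        omega
  | case2 out hlt =>
    intro hmod helem
    rw [pvGenLoop, if_neg hlt]
    exact ⟨by omega, hmod, helem⟩

lemma generate_eq (input_ : List Int) (i : Nat) :
    generate_output_pattern input_ i = (List.range input_.length).map (fun j => pvCoef i j) := by
  obtain ⟨hlen, hmod, helem⟩ := pvGenLoop_spec (input_.length + 1) i [] (by simp) (by simp)
  unfold generate_output_pattern
  apply List.ext_getElem
  · simp; omega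
  · intro j h1 h2
    simp only [List.getElem_take, List.getElem_drop, List.getElem_map, List.getElem_range]
    rw [helem (1 + j) (by simp at h1; omega)]
    rw [Nat.add_comm 1 j]; rfl

-- A's row sum as an indexed sum
lemma rowA_eq (xs : List Int) (i : Nat) :
    (xs.zip ((List.range xs.length).map (fun j => pvCoef i j))).foldl
      (fun s (xy : Int × Int) => s + xy.1 * xy.2) 0
    = ∑ j ∈ Finset.range xs.length, xs.getD j 0 * pvCoef i j := by
  rw [PySem.List.foldl_add _ (fun xy : Int × Int => xy.1 * xy.2) 0, zero_add, ← sum_map_range]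
  congr 1
  apply List.ext_getElem
  · simp
  · intro j h1 h2
    simp only [List.getElem_map, List.getElem_zip, List.getElem_range]
    rw [List.getD_eq_getElem _ _ (by simp at h1; omega)]

-- the prefix list built by B
lemma pvPrefix_foldl (xs : List Int) (pr : List Int) (acc : Int) :
    (xs.foldl (fun st v => (st.1 ++ [st.2 + v], st.2 + v)) (pr, acc)).1
    = pr ++ (List.range xs.length).map (fun t => acc + ∑ j ∈ Finset.range (t + 1), xs.getD j 0) := by
  induction xs generalizing pr acc with
  | nil => simp
  | cons x xs ih =>
    simp only [List.foldl_cons, List.length_cons]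
    rw [ih, List.range_succ_eq_map, List.map_cons, List.map_map, List.append_assoc]
    congr 1
    rw [List.singleton_append]
    congr 1
    · rw [Finset.sum_range_one, List.getD_cons_zero]
    · apply List.map_congr_left
      intro t _
      show acc + x + _ = acc + _
      conv_rhs => rw [Finset.sum_range_succ']
      simp only [List.getD_cons_succ, List.getD_cons_zero]
      ring

lemma pvPrefix_getD (xs : List Int) (m : Nat) (hm : m ≤ xs.length) :
    (pvPrefix xs).getD m 0 = ∑ j ∈ Finset.range m, xs.getD j 0 := by
  unfold pvPrefix
  rw [pvPrefix_foldl]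
  cases m with
  | zero => simp
  | succ u =>
    rw [List.singleton_append, List.getD_cons_succ]
    rw [List.getD_eq_getElem _ _ (by simp; omega)]
    simp

lemma pvPlusLoop_spec (xs : List Int) (k1 start : Nat) (s : Int)
    (hmod : start % (4 * (k1 + 1)) = k1) :
    pvPlusLoop (pvPrefix xs) xs.length k1 start s
    = s + ∑ j ∈ Finset.Ico start xs.length, pvIte1 xs k1 j := by
  revert hmod
  induction start, s using pvPlusLoop.induct (pvPrefix xs) xs.length k1 with
  | case1 start s hlt ih =>
    intro hmod
    rw [pvPlusLoop, if_pos hlt]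
    rw [ih (by rw [Nat.add_mod_right]; exact hmod)]
    obtain ⟨q, hs⟩ : ∃ q, start = (k1 + 1) * (4 * q) + k1 :=
      ⟨start / (4 * (k1 + 1)), by
        conv_lhs => rw [← Nat.div_add_mod start (4 * (k1 + 1))]
        rw [hmod]; ring_nf⟩
    have e1 : (4 * q + 1) * (k1 + 1) = (k1 + 1) * (4 * q) + (k1 + 1) := by ring
    have e2 : (4 * q + 2) * (k1 + 1) = (k1 + 1) * (4 * q) + 2 * (k1 + 1) := by ring
    have e2' : (4 * q + 1 + 1) * (k1 + 1) = (k1 + 1) * (4 * q) + 2 * (k1 + 1) := by ring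
    have e5 : (4 * q + 5) * (k1 + 1) = (k1 + 1) * (4 * q) + 5 * (k1 + 1) := by ring
    have h0 : start ≤ min (start + (k1 + 1)) xs.length := by omega
    have h1 : min (start + (k1 + 1)) xs.length ≤ min (start + 4 * (k1 + 1)) xs.length := by omega
    have h2 : min (start + 4 * (k1 + 1)) xs.length ≤ xs.length := by omega
    have hB : (pvPrefix xs).getD (min (start + (k1 + 1)) xs.length) 0 - (pvPrefix xs).getD start 0
        = ∑ j ∈ Finset.Ico start (min (start + (k1 + 1)) xs.length), xs.getD j 0 := by
      rw [pvPrefix_getD xs _ (by omega), pvPrefix_getD xs start (by omega),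
          Finset.sum_Ico_eq_sub _ h0]
    have hone : ∑ j ∈ Finset.Ico start (min (start + (k1 + 1)) xs.length), pvIte1 xs k1 j
        = ∑ j ∈ Finset.Ico start (min (start + (k1 + 1)) xs.length), xs.getD j 0 := by
      refine Finset.sum_congr rfl fun j hj => ?_
      rw [Finset.mem_Ico] at hj
      unfold pvIte1
      rw [if_pos]
      have hdiv : (j + 1) / (k1 + 1) = 4 * q + 1 :=
        Nat.div_eq_of_lt_le (by omega) (by omega)
      omega
    have hzero : ∑ j ∈ Finset.Ico (min (start + (k1 + 1)) xs.length)
        (min (start + 4 * (k1 + 1)) xs.length), pvIte1 xs k1 j = 0 := by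
      refine Finset.sum_eq_zero fun j hj => ?_
      rw [Finset.mem_Ico] at hj
      unfold pvIte1
      rw [if_neg]
      have hlow : 4 * q + 2 ≤ (j + 1) / (k1 + 1) := by
        rw [Nat.le_div_iff_mul_le (by omega)]; omega
      have hhigh : (j + 1) / (k1 + 1) < 4 * q + 5 := by
        rw [Nat.div_lt_iff_lt_mul (by omega)]; omega
      generalize (j + 1) / (k1 + 1) = d at hlow hhigh ⊢
      omega
    have htail : ∑ j ∈ Finset.Ico (min (start + 4 * (k1 + 1)) xs.length) xs.length, pvIte1 xs k1 j
        = ∑ j ∈ Finset.Ico (start + 4 * (k1 + 1)) xs.length, pvIte1 xs k1 j := by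
      rcases Nat.lt_or_ge xs.length (start + 4 * (k1 + 1)) with h | h
      · rw [min_eq_right (by omega), Finset.Ico_self, Finset.Ico_eq_empty (by omega)]
      · rw [min_eq_left h]
    rw [← Finset.sum_Ico_consecutive (fun j => pvIte1 xs k1 j) h0 (le_trans h1 h2),
        ← Finset.sum_Ico_consecutive (fun j => pvIte1 xs k1 j) h1 h2,
        hone, hzero, htail, hB]
    ring
  | case2 start s hge =>
    intro hmod
    rw [pvPlusLoop, if_neg hge, Finset.Ico_eq_empty (by omega)]
    simp

lemma pvMinusLoop_spec (xs : List Int) (k1 start : Nat) (s : Int)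
    (hmod : start % (4 * (k1 + 1)) = 3 * k1 + 2) :
    pvMinusLoop (pvPrefix xs) xs.length k1 start s
    = s - ∑ j ∈ Finset.Ico start xs.length, pvIte3 xs k1 j := by
  revert hmod
  induction start, s using pvMinusLoop.induct (pvPrefix xs) xs.length k1 with
  | case1 start s hlt ih =>
    intro hmod
    rw [pvMinusLoop, if_pos hlt]
    rw [ih (by rw [Nat.add_mod_right]; exact hmod)]
    obtain ⟨q, hs⟩ : ∃ q, start = (k1 + 1) * (4 * q) + 3 * k1 + 2 :=
      ⟨start / (4 * (k1 + 1)), by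
        conv_lhs => rw [← Nat.div_add_mod start (4 * (k1 + 1))]
        rw [hmod]; ring_nf⟩
    have e3 : (4 * q + 3) * (k1 + 1) = (k1 + 1) * (4 * q) + 3 * (k1 + 1) := by ring
    have e4 : (4 * q + 4) * (k1 + 1) = (k1 + 1) * (4 * q) + 4 * (k1 + 1) := by ring
    have e4' : (4 * q + 3 + 1) * (k1 + 1) = (k1 + 1) * (4 * q) + 4 * (k1 + 1) := by ring
    have e7 : (4 * q + 7) * (k1 + 1) = (k1 + 1) * (4 * q) + 7 * (k1 + 1) := by ring
    have h0 : start ≤ min (start + (k1 + 1)) xs.length := by omega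
    have h1 : min (start + (k1 + 1)) xs.length ≤ min (start + 4 * (k1 + 1)) xs.length := by omega
    have h2 : min (start + 4 * (k1 + 1)) xs.length ≤ xs.length := by omega
    have hB : (pvPrefix xs).getD (min (start + (k1 + 1)) xs.length) 0 - (pvPrefix xs).getD start 0
        = ∑ j ∈ Finset.Ico start (min (start + (k1 + 1)) xs.length), xs.getD j 0 := by
      rw [pvPrefix_getD xs _ (by omega), pvPrefix_getD xs start (by omega),
          Finset.sum_Ico_eq_sub _ h0]
    have hone : ∑ j ∈ Finset.Ico start (min (start + (k1 + 1)) xs.length), pvIte3 xs k1 j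
        = ∑ j ∈ Finset.Ico start (min (start + (k1 + 1)) xs.length), xs.getD j 0 := by
      refine Finset.sum_congr rfl fun j hj => ?_
      rw [Finset.mem_Ico] at hj
      unfold pvIte3
      rw [if_pos]
      have hdiv : (j + 1) / (k1 + 1) = 4 * q + 3 :=
        Nat.div_eq_of_lt_le (by omega) (by omega)
      omega
    have hzero : ∑ j ∈ Finset.Ico (min (start + (k1 + 1)) xs.length)
        (min (start + 4 * (k1 + 1)) xs.length), pvIte3 xs k1 j = 0 := by
      refine Finset.sum_eq_zero fun j hj => ?_
      rw [Finset.mem_Ico] at hj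
      unfold pvIte3
      rw [if_neg]
      have hlow : 4 * q + 4 ≤ (j + 1) / (k1 + 1) := by
        rw [Nat.le_div_iff_mul_le (by omega)]; omega
      have hhigh : (j + 1) / (k1 + 1) < 4 * q + 7 := by
        rw [Nat.div_lt_iff_lt_mul (by omega)]; omega
      generalize (j + 1) / (k1 + 1) = d at hlow hhigh ⊢
      omega
    have htail : ∑ j ∈ Finset.Ico (min (start + 4 * (k1 + 1)) xs.length) xs.length, pvIte3 xs k1 j
        = ∑ j ∈ Finset.Ico (start + 4 * (k1 + 1)) xs.length, pvIte3 xs k1 j := by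
      rcases Nat.lt_or_ge xs.length (start + 4 * (k1 + 1)) with h | h
      · rw [min_eq_right (by omega), Finset.Ico_self, Finset.Ico_eq_empty (by omega)]
      · rw [min_eq_left h]
    rw [← Finset.sum_Ico_consecutive (fun j => pvIte3 xs k1 j) h0 (le_trans h1 h2),
        ← Finset.sum_Ico_consecutive (fun j => pvIte3 xs k1 j) h1 h2,
        hone, hzero, htail, hB]
    ring
  | case2 start s hge =>
    intro hmod
    rw [pvMinusLoop, if_neg hge, Finset.Ico_eq_empty (by omega)]
    simp

-- the two sides' row sums agree
lemma row_eq (xs : List Int) (i : Nat) (hi : i < xs.length) :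
    ∑ j ∈ Finset.range xs.length, xs.getD j 0 * pvCoef i j
    = (∑ j ∈ Finset.Ico i xs.length, pvIte1 xs i j)
      - ∑ j ∈ Finset.Ico (3 * i + 2) xs.length, pvIte3 xs i j := by
  have hsplit : ∀ j, xs.getD j 0 * pvCoef i j = pvIte1 xs i j - pvIte3 xs i j := by
    intro j
    unfold pvCoef pvIte1 pvIte3
    have hd : (j + 1) / (i + 1) % 4 < 4 := Nat.mod_lt _ (by omega)
    set d := (j + 1) / (i + 1) % 4 with hdd
    interval_cases d <;> simp [pvBase, BASE_PATTERN]
  have hplus : ∑ j ∈ Finset.range xs.length, pvIte1 xs i j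
      = ∑ j ∈ Finset.Ico i xs.length, pvIte1 xs i j := by
    rw [Finset.range_eq_Ico, ← Finset.sum_Ico_consecutive _ (Nat.zero_le i) (le_of_lt hi)]
    have hz : ∑ j ∈ Finset.Ico 0 i, pvIte1 xs i j = 0 := by
      refine Finset.sum_eq_zero fun j hj => ?_
      rw [Finset.mem_Ico] at hj
      unfold pvIte1
      rw [if_neg]
      have hd0 : (j + 1) / (i + 1) = 0 := Nat.div_eq_of_lt (by omega)
      rw [hd0]; omega
    rw [hz, zero_add]
  have hminus : ∑ j ∈ Finset.range xs.length, pvIte3 xs i j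
      = ∑ j ∈ Finset.Ico (3 * i + 2) xs.length, pvIte3 xs i j := by
    rw [Finset.range_eq_Ico,
        ← Finset.sum_Ico_consecutive _ (Nat.zero_le (min (3 * i + 2) xs.length)) (min_le_right _ _)]
    have hz : ∑ j ∈ Finset.Ico 0 (min (3 * i + 2) xs.length), pvIte3 xs i j = 0 := by
      refine Finset.sum_eq_zero fun j hj => ?_
      rw [Finset.mem_Ico] at hj
      unfold pvIte3
      rw [if_neg]
      have h3 : (j + 1) / (i + 1) < 3 := by
        rw [Nat.div_lt_iff_lt_mul (by omega)]; omega
      generalize (j + 1) / (i + 1) = d at h3 ⊢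
      omega
    rw [hz, zero_add]
    rcases Nat.lt_or_ge xs.length (3 * i + 2) with h | h
    · rw [min_eq_right (by omega), Finset.Ico_self, Finset.Ico_eq_empty (by omega)]
    · rw [min_eq_left h]
  rw [show (∑ j ∈ Finset.range xs.length, xs.getD j 0 * pvCoef i j)
        = ∑ j ∈ Finset.range xs.length, (pvIte1 xs i j - pvIte3 xs i j)
      from Finset.sum_congr rfl (fun j _ => hsplit j),
      Finset.sum_sub_distrib, hplus, hminus]

-- ===== VERDICT (by name: the statement is the Claim_ definition above) =====
theorem apply_pattern_spec : Claim_equal_apply_pattern := by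
  intro input_ _
  unfold Spec_apply_pattern apply_pattern apply_pattern_alt
  rw [PySem.List.foldl_append_singleton_eq_map, PySem.List.foldl_append_singleton_eq_map]
  refine congrArg _ (List.map_congr_left fun i hi => ?_)
  rw [List.mem_range] at hi
  rw [generate_eq, rowA_eq,
      pvPlusLoop_spec input_ i i 0 (Nat.mod_eq_of_lt (by omega)),
      pvMinusLoop_spec input_ i (3 * i + 2) _ (Nat.mod_eq_of_lt (by omega)),
      row_eq input_ i hi]
  ring_nf
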